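-- pv_equiv track=rewrite | github.com/RaquelBehrens/distributed-computing | t2_replicacao_adiada/node_client.py | isInWrite
-- ===== SOURCE A (Python) =====
-- def isInWrite(read_item, write_list):
--     return_value = None
--     for value in write_list:
--         if (read_item == value[0]):
--             return_value = (True, value[1])
--
--     if (return_value == None):
--         return (False, None)
--
--     return return_value
-- ===== SOURCE B (Python) =====
-- def isInWrite(read_item, write_list):
--     for value in reversed(write_list):
--         if read_item == value[0]:
--             return (True, value[1])
--     return (False, None)
-- ===== Notes on version B (the rewrite author's own statement) =====
-- stated objective: idiomatic
-- what changed: Scan write_list backwards and return immediately on the first matching key, instead of a full forward scan that keeps overwriting an accumulator.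
import Mathlib
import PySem

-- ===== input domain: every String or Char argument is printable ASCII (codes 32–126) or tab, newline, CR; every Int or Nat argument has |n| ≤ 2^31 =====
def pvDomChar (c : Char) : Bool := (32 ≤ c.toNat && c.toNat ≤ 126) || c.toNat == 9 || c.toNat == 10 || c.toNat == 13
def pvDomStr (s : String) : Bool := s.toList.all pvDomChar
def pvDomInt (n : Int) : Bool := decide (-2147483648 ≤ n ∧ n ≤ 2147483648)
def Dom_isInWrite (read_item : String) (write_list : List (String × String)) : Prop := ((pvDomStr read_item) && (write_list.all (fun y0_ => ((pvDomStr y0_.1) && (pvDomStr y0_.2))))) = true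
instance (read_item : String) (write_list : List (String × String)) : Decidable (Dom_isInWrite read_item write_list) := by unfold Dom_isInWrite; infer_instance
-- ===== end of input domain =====

-- B scans backwards with an early return instead of A's forward overwrite loop; idiomatic, same cost. Return-value equivalence only (no side effects in either).

-- ===== PORT A =====
-- A: forward fold keeping the last matching value (return_value), then final test.
def isInWrite (read_item : String) (write_list : List (String × String)) : Bool × Option String :=
  let return_value : Option String :=
    write_list.foldl (fun acc value => if read_item == value.1 then some value.2 else acc) none
  match return_value with
  | none => (false, none)
  | some s => (true, some s)

-- ===== PORT B =====
-- B helper: the loop body 'for value in reversed(write_list): if match: return …' as structural recursion.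
def isInWriteRevGo (read_item : String) : List (String × String) → Bool × Option String
  | [] => (false, none)
  | value :: rest =>
    if read_item == value.1 then (true, some value.2) else isInWriteRevGo read_item rest

def isInWrite_alt (read_item : String) (write_list : List (String × String)) : Bool × Option String :=
  isInWriteRevGo read_item write_list.reverse

-- ===== PRECONDITION & SPEC =====
def Spec_isInWrite (read_item : String) (write_list : List (String × String)) (out : Bool × Option String) : Prop := out = isInWrite_alt read_item write_list
instance (read_item : String) (write_list : List (String × String)) (out : Bool × Option String) : Decidable (Spec_isInWrite read_item write_list out) := by unfold Spec_isInWrite; infer_instance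

-- ===== CLAIM (what is proved, stated in full; the proofs are below) =====
def Claim_equal_isInWrite : Prop := ∀ (read_item : String) (write_list : List (String × String)), Dom_isInWrite read_item write_list → Spec_isInWrite read_item write_list (isInWrite read_item write_list)

-- ===== LEMMAS AND PROOFS =====

-- first match of the key in a list, as an Option
def firstMatch (k : String) : List (String × String) → Option String
  | [] => none
  | v :: t => if k == v.1 then some v.2 else firstMatch k t

theorem firstMatch_append_singleton (k : String) (xs : List (String × String)) (v : String × String) :
    firstMatch k (xs ++ [v]) =
      match firstMatch k xs with
      | some s => some s
      | none => if k == v.1 then some v.2 else none := by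
  induction xs with
  | nil => simp [firstMatch]
  | cons x t ih =>
    by_cases h : k == x.1 <;> simp [firstMatch, h, ih]

theorem foldl_eq_firstMatch_reverse (k : String) (l : List (String × String)) (a : Option String) :
    l.foldl (fun acc value => if k == value.1 then some value.2 else acc) a =
      match firstMatch k l.reverse with
      | some s => some s
      | none => a := by
  induction l generalizing a with
  | nil => simp [firstMatch]
  | cons v t ih =>
    simp only [List.foldl_cons, List.reverse_cons, firstMatch_append_singleton, ih]
    cases firstMatch k t.reverse <;> by_cases h : k == v.1 <;> simp [h]

theorem revGo_eq_firstMatch (k : String) (l : List (String × String)) :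
    isInWriteRevGo k l =
      match firstMatch k l with
      | some s => (true, some s)
      | none => (false, none) := by
  induction l with
  | nil => rfl
  | cons v t ih => by_cases h : k == v.1 <;> simp [isInWriteRevGo, firstMatch, h, ih]

-- ===== VERDICT (by name: the statement is the Claim_ definition above) =====
theorem isInWrite_spec : Claim_equal_isInWrite := by
  intro k l _
  unfold Spec_isInWrite isInWrite isInWrite_alt
  rw [foldl_eq_firstMatch_reverse, revGo_eq_firstMatch]
  cases firstMatch k l.reverse <;> rfl
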